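-- pv_equiv track=rewrite | github.com/moyaBBF3/python_lists_hexlet | find_second_index.py | find_second_index
-- ===== SOURCE A (Python) =====
-- def find_second_index(value, items):
--     '''
--     Функция возвращает индекс второго подходящего
--     элемента в последовательности.Если подходящих
--     элементов в последовательности меньше двух
--     или же последовательность пуста, нужно
--     возвращать None.
--
--     '''
--     result = []
--     for index, item in enumerate(items):
--         if item == value:
--             result.append(index)
--     try:
--         return result[1]
--     except IndexError:
--         return None
-- ===== SOURCE B (Python) =====
-- def find_second_index(value, items):
--     seen = 0
--     for index, item in enumerate(items):
--         if item == value: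
--             seen += 1
--             if seen == 2:
--                 return index
--     return None
-- ===== Notes on version B (the rewrite author's own statement) =====
-- stated objective: simpler
-- what changed: Replaces collecting all matching indices into a list and indexing [1] under try/except with a single match counter and an immediate return at the second match.
import Mathlib
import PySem

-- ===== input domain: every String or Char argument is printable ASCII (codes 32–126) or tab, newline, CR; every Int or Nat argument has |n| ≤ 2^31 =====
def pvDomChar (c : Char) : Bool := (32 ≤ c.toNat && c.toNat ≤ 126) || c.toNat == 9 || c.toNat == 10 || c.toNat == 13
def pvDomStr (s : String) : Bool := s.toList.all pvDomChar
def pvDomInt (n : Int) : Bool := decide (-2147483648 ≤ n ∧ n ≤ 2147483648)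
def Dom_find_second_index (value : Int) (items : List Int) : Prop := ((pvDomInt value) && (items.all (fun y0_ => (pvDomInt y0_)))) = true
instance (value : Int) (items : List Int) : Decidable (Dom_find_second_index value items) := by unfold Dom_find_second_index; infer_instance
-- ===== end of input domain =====

-- B replaces A's build-a-list-of-all-match-indices-then-take-[1] with a single
-- match counter and an immediate return at the second match (simpler, O(1) space).

-- ===== PORT A =====
-- result = []; for index, item in enumerate(items): if item == value: result.append(index)
-- try: return result[1] except IndexError: return None   (result[1] = pyGet? result 1, none = IndexError)
def find_second_index (value : Int) (items : List Int) : Option Int :=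
  let result : List Int :=
    (PySem.List.enumerate items).foldl
      (fun acc p => if p.2 = value then acc ++ [p.1] else acc) []
  PySem.List.pyGet? result 1

-- ===== PORT B =====
-- counter loop with early return at the second match
def fsiAux (value : Int) (idx : Int) (seen : Nat) : List Int → Option Int
  | [] => none
  | x :: xs =>
    if x = value then
      if seen + 1 = 2 then some idx
      else fsiAux value (idx + 1) (seen + 1) xs
    else fsiAux value (idx + 1) seen xs

def find_second_index_alt (value : Int) (items : List Int) : Option Int :=
  fsiAux value 0 0 items

-- ===== PRECONDITION & SPEC =====
def Spec_find_second_index (value : Int) (items : List Int) (out : Option Int) : Prop := out = find_second_index_alt value items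
instance (value : Int) (items : List Int) (out : Option Int) : Decidable (Spec_find_second_index value items out) := by unfold Spec_find_second_index; infer_instance

-- ===== CLAIM (what is proved, stated in full; the proofs are below) =====
def Claim_equal_find_second_index : Prop := ∀ (value : Int) (items : List Int), Dom_find_second_index value items → Spec_find_second_index value items (find_second_index value items)

-- ===== LEMMAS AND PROOFS =====

-- the list of matching indices A collects, starting at index i
def fsiCollect (value : Int) (i : Int) : List Int → List Int
  | [] => []
  | x :: xs => if x = value then i :: fsiCollect value (i + 1) xs
               else fsiCollect value (i + 1) xs

theorem fsi_foldl_collect (value : Int) (items : List Int) (i : Int) (acc : List Int) :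
    (PySem.List.enumerate items i).foldl
      (fun acc p => if p.2 = value then acc ++ [p.1] else acc) acc
      = acc ++ fsiCollect value i items := by
  induction items generalizing i acc with
  | nil => simp [PySem.List.enumerate_nil, fsiCollect]
  | cons x xs ih =>
    simp only [PySem.List.enumerate_cons, List.foldl_cons, fsiCollect]
    by_cases h : x = value <;> simp [h, ih]

theorem fsi_aux_one (value : Int) (items : List Int) (i : Int) :
    fsiAux value i 1 items = (fsiCollect value i items).head? := by
  induction items generalizing i with
  | nil => simp [fsiAux, fsiCollect]
  | cons x xs ih =>
    by_cases h : x = value <;> simp [fsiAux, fsiCollect, h, ih]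

theorem fsi_aux_zero (value : Int) (items : List Int) (i : Int) :
    fsiAux value i 0 items = (fsiCollect value i items)[1]? := by
  induction items generalizing i with
  | nil => simp [fsiAux, fsiCollect]
  | cons x xs ih =>
    by_cases h : x = value
    · simp [fsiAux, fsiCollect, h, fsi_aux_one,
        List.head?_eq_getElem?]
    · simp [fsiAux, fsiCollect, h, ih]

-- ===== VERDICT (by name: the statement is the Claim_ definition above) =====
theorem fsi_pyGet?_one (xs : List Int) : PySem.List.pyGet? xs 1 = xs[1]? := by
  simp [PySem.List.pyGet?, PySem.List.pyIdx?]
  split <;> rename_i h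
  · rfl
  · symm
    exact List.getElem?_eq_none (by omega)

theorem find_second_index_spec : Claim_equal_find_second_index := by
  intro value items _
  show find_second_index value items = find_second_index_alt value items
  unfold find_second_index find_second_index_alt
  simp only [fsi_foldl_collect value items 0 [], List.nil_append, fsi_pyGet?_one,
    fsi_aux_zero]
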